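-- pv_equiv track=rewrite | github.com/pianowow/concentrate | src/concentrate/evolve.py | numscore
-- ===== SOURCE A (Python) =====
-- def numscore(board):
--     blue = 0
--     red = 0
--     for char in board:
--         if char == 'B':
--             blue += 1
--         elif char == 'b':
--             blue += 1
--         elif char == 'R':
--             red += 1
--         elif char == 'r':
--             red += 1
--     return blue,red
-- ===== SOURCE B (Python) =====
-- def numscore(board):
--     blue = sum(c in 'Bb' for c in board)
--     red = sum(c in 'Rr' for c in board)
--     return blue, red
-- ===== Notes on version B (the rewrite author's own statement) =====
-- stated objective: simpler
-- what changed: Replaces the single if/elif loop over two accumulators by two staged passes, each summing a boolean membership test over the string.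
import Mathlib
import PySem

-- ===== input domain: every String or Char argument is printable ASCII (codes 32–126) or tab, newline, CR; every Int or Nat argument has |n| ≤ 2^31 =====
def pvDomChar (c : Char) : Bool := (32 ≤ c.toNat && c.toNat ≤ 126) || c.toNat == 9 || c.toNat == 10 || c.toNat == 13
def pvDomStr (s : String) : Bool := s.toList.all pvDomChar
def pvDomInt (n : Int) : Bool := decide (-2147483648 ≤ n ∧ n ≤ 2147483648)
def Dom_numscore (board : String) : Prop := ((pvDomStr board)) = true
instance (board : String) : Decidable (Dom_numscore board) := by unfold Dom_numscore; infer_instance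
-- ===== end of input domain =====

-- B replaces A's single if/elif loop over two accumulators with two staged passes, each summing a boolean membership test (simpler; same cost).

-- ===== PORT A =====
def numscore (board : String) : Int × Int :=
  let st := board.toList.foldl
    (fun (p : Int × Int) char =>
      if char = 'B' then (p.1 + 1, p.2)
      else if char = 'b' then (p.1 + 1, p.2)
      else if char = 'R' then (p.1, p.2 + 1)
      else if char = 'r' then (p.1, p.2 + 1)
      else p) (0, 0)
  (st.1, st.2)

-- ===== PORT B =====
-- sum(c in 'Bb' for c in board): Python sums the booleans as 0/1 ints
def numscore_alt (board : String) : Int × Int :=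
  let blue : Int :=
    (board.toList.map (fun c => if PySem.Chars.isIn [c] "Bb".toList then (1 : Int) else 0)).sum
  let red : Int :=
    (board.toList.map (fun c => if PySem.Chars.isIn [c] "Rr".toList then (1 : Int) else 0)).sum
  (blue, red)

-- ===== PRECONDITION & SPEC =====
def Spec_numscore (board : String) (out : Int × Int) : Prop := out = numscore_alt board
instance (board : String) (out : Int × Int) : Decidable (Spec_numscore board out) := by unfold Spec_numscore; infer_instance

-- ===== CLAIM (what is proved, stated in full; the proofs are below) =====
def Claim_equal_numscore : Prop := ∀ (board : String), Dom_numscore board → Spec_numscore board (numscore board)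

-- ===== LEMMAS AND PROOFS =====

-- A's fold accumulates exactly the counts of 'B'+'b' and 'R'+'r' on top of the initial state.
theorem numscore_fold_eq (l : List Char) (b r : Int) :
    l.foldl
      (fun (p : Int × Int) char =>
        if char = 'B' then (p.1 + 1, p.2)
        else if char = 'b' then (p.1 + 1, p.2)
        else if char = 'R' then (p.1, p.2 + 1)
        else if char = 'r' then (p.1, p.2 + 1)
        else p) (b, r)
    = (b + l.count 'B' + l.count 'b', r + l.count 'R' + l.count 'r') := by
  induction l generalizing b r with
  | nil => simp
  | cons c t ih =>
    simp only [List.foldl_cons, List.count_cons]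
    by_cases h1 : c = 'B'
    · subst h1; rw [if_pos rfl, ih]; simp; ring_nf
    by_cases h2 : c = 'b'
    · subst h2; rw [if_neg h1, if_pos rfl, ih]; simp; ring_nf
    by_cases h3 : c = 'R'
    · subst h3; rw [if_neg h1, if_neg h2, if_pos rfl, ih]; simp; ring_nf
    by_cases h4 : c = 'r'
    · subst h4; rw [if_neg h1, if_neg h2, if_neg h3, if_pos rfl, ih]; simp; ring_nf
    · rw [if_neg h1, if_neg h2, if_neg h3, if_neg h4, ih]
      simp [h1, h2, h3, h4]

-- 'c in xy' for a one-char needle over a two-char haystack is membership of c in the pair.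
theorem isIn_singleton_pair (c x y : Char) :
    PySem.Chars.isIn [c] [x, y] = (c = x ∨ c = y : Bool) := by
  have key : [c] <:+: [x, y] ↔ c ∈ [x, y] := by
    constructor
    · intro h; exact List.singleton_sublist.mp h.sublist
    · intro h
      obtain ⟨p, s, hps⟩ := List.append_of_mem h
      exact ⟨p, s, by simp [hps]⟩
  by_cases hc : c ∈ [x, y]
  · have ht : PySem.Chars.isIn [c] [x, y] = true :=
      (PySem.Chars.isIn_iff_infix [c] [x, y]).mpr (key.mpr hc)
    simp only [List.mem_cons, List.not_mem_nil, or_false] at hc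
    simp [ht, hc]
  · have hf : PySem.Chars.isIn [c] [x, y] = false :=
      (PySem.Chars.isIn_eq_false_iff [c] [x, y]).mpr (fun hinf => hc (key.mp hinf))
    simp only [List.mem_cons, List.not_mem_nil, or_false, not_or] at hc
    simp [hf, hc.1, hc.2]

-- Summing the 0/1 indicator of membership in [x,y] (x ≠ y) counts x plus counts y.
theorem sum_indicator_pair (x y : Char) (hxy : x ≠ y) (l : List Char) :
    (l.map (fun c => if PySem.Chars.isIn [c] [x, y] then (1 : Int) else 0)).sum
      = l.count x + l.count y := by
  simp only [isIn_singleton_pair]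
  induction l with
  | nil => simp
  | cons c t ih =>
    simp only [List.map_cons, List.sum_cons, List.count_cons, ih]
    by_cases h1 : c = x
    · subst h1; simp [hxy]; ring
    by_cases h2 : c = y
    · subst h2; simp [h1]; ring
    · simp [h1, h2]

-- ===== VERDICT (by name: the statement is the Claim_ definition above) =====
theorem numscore_spec : Claim_equal_numscore := by
  intro board _
  unfold Spec_numscore numscore numscore_alt
  have hB := sum_indicator_pair 'B' 'b' (by decide) board.toList
  have hR := sum_indicator_pair 'R' 'r' (by decide) board.toList
  simp only [numscore_fold_eq]
  have : "Bb".toList = ['B', 'b'] := rfl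
  rw [this]
  have : "Rr".toList = ['R', 'r'] := rfl
  rw [this]
  rw [hB, hR]
  simp
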